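-- pv_equiv track=rewrite | github.com/mukul8896/TradingAgent | utils/news_fetcher.py | combine_news_by_company
-- ===== SOURCE A (Python) =====
-- def combine_news_by_company(all_news_articles):
--     """
--     Combine multiple news articles for the same ticker/company into a single object.
--     Descriptions are concatenated as bullet points, duplicates removed.
--     Returns a list of combined news dictionaries.
--     """
--     combined_news = {}
--
--     for item in all_news_articles:
--         ticker = item.get("ticker") or item.get("companyName") or "Unknown"
--         desc = item.get("description") or ""
--         if not desc:
--             continue  # skip empty descriptions
--
--         if ticker in combined_news:
--             existing_desc = combined_news[ticker]["description"]
--             existing_lines = set(existing_desc.split("\n• "))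
--             for line in desc.split(". "):  # simple sentence split
--                 line = line.strip()
--                 if line and line not in existing_lines:
--                     combined_news[ticker]["description"] += f"\n• {line}"
--             # Add sources and urls
--             # if item.get("source"):
--             #     combined_news[ticker]["sources"].add(item["source"])
--             # if item.get("url"):
--             #     combined_news[ticker]["urls"].append(item["url"])
--         else:
--             combined_news[ticker] = {
--                 "ticker": ticker,
--                 "title": item.get("title") or "",
--                 "description": f"• {desc}",
--                 # "sources": set([item.get("source")]) if item.get("source") else set(),
--                 # "urls": [item.get("url")] if item.get("url") else []
--             }
--
--     # Convert sources set to list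
--     # for item in combined_news.values():
--     #     item["sources"] = list(item["sources"])
--
--     return list(combined_news.values())
-- ===== SOURCE B (Python) =====
-- def combine_news_by_company(all_news_articles):
--     # Phase 1: group the items with a non-empty description by ticker key,
--     # in first-appearance order.
--     groups = {}
--     for item in all_news_articles:
--         if item.get("description") or "":
--             key = item.get("ticker") or item.get("companyName") or "Unknown"
--             groups.setdefault(key, []).append(item)
--     # Phase 2: render each group into one combined dict.
--     combined = []
--     for ticker, items in groups.items():
--         first = items[0]
--         description = "• " + (first.get("description") or "")
--         for item in items[1:]:
--             seen = set(description.split("\n• "))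
--             fresh = [line
--                      for line in (raw.strip() for raw in (item.get("description") or "").split(". "))
--                      if line and line not in seen]
--             description += "".join("\n• " + line for line in fresh)
--         combined.append({"ticker": ticker,
--                          "title": first.get("title") or "",
--                          "description": description})
--     return combined
-- ===== Notes on version B (the rewrite author's own statement) =====
-- stated objective: alternative
-- what changed: B replaces A's single pass that mutates nested dicts (re-splitting the stored description and conditionally appending inside the line loop) by two phases: first group the non-empty-description items per ticker key in first-appearance order, then render each group by filtering the stripped candidate lines against the seen-set and joining the survivors onto the description.
import Mathlib
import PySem

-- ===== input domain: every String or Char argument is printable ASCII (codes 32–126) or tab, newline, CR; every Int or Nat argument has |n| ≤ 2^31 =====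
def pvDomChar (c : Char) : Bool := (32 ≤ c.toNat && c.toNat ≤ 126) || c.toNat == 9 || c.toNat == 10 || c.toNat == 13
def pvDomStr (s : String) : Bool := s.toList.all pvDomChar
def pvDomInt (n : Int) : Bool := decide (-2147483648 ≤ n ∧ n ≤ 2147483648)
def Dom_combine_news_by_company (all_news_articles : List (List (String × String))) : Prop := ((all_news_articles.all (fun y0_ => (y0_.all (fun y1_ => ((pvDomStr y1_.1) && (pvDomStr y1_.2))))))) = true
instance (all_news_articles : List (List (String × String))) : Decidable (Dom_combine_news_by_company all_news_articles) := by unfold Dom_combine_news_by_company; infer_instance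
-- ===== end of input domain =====

-- B regroups the work into two phases (group items by ticker, then render each group
-- by filter-and-join instead of A's dict-mutating conditional append); objective: alternative decomposition.

-- shared helpers: Python's item.get(k), and `x or y` on strings/None
def pvGet (item : List (String × String)) (k : String) : Option String :=
  (PySem.Dict.mk item).get? k

def pvOr (o : Option String) (y : String) : String :=
  match o with
  | some s => if s = "" then y else s
  | none => y

def pvKey (item : List (String × String)) : String :=
  pvOr (pvGet item "ticker") (pvOr (pvGet item "companyName") "Unknown")

def pvDesc (item : List (String × String)) : String :=
  pvOr (pvGet item "description") ""

def pvTitle (item : List (String × String)) : String :=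
  pvOr (pvGet item "title") ""

-- Python s.split(sep) for a non-empty literal sep (PySem.Str.split? is none only for sep = "")
def pvSplit (s sep : String) : List String :=
  (PySem.Str.split? s sep).getD [s]

-- ===== PORT A =====
def pvStepA (d : PySem.Dict String (PySem.Dict String String)) (item : List (String × String)) :
    PySem.Dict String (PySem.Dict String String) :=
  let ticker := pvKey item
  let desc := pvDesc item
  if desc = "" then d
  else if d.contains ticker then
    let existing := (d.getD ticker (PySem.Dict.mk [])).getD "description" ""
    let existingLines := PySem.Set.ofList (pvSplit existing "\n• ")
    (pvSplit desc ". ").foldl (fun dd rawLine =>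
      let line := PySem.Str.strip rawLine
      if line ≠ "" ∧ PySem.Set.contains existingLines line = false then
        dd.modify ticker (PySem.Dict.mk [])
          (fun e => e.modify "description" "" (fun s => s ++ "\n• " ++ line))
      else dd) d
  else
    d.insert ticker (PySem.Dict.mk
      [("ticker", ticker), ("title", pvTitle item), ("description", "• " ++ desc)])

def combine_news_by_company (all_news_articles : List (List (String × String))) :
    List (List (String × String)) :=
  ((all_news_articles.foldl pvStepA PySem.Dict.empty).values).map PySem.Dict.items

-- ===== PORT B =====
def pvRenderGroup (ticker : String) (items : List (List (String × String))) :
    List (String × String) :=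
  match items with
  | [] => []  -- unreachable: phase 1 only creates non-empty groups
  | first :: rest =>
    let description := rest.foldl (fun descAcc item =>
        let seen := PySem.Set.ofList (pvSplit descAcc "\n• ")
        let fresh := ((pvSplit (pvDesc item) ". ").map PySem.Str.strip).filter
            (fun line => line ≠ "" && !(PySem.Set.contains seen line))
        descAcc ++ PySem.Str.join "" (fresh.map (fun line => "\n• " ++ line)))
      ("• " ++ pvDesc first)
    [("ticker", ticker), ("title", pvTitle first), ("description", description)]

def combine_news_by_company_alt (all_news_articles : List (List (String × String))) :
    List (List (String × String)) :=
  let groups := all_news_articles.foldl (fun g item =>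
      if pvDesc item ≠ "" then
        let key := pvKey item
        (g.setdefault key []).modify key [] (fun its => its ++ [item])
      else g)
    (PySem.Dict.empty : PySem.Dict String (List (List (String × String))))
  groups.items.map (fun p => pvRenderGroup p.1 p.2)

-- ===== PRECONDITION & SPEC =====
def Spec_combine_news_by_company (all_news_articles : List (List (String × String))) (out : List (List (String × String))) : Prop := out = combine_news_by_company_alt all_news_articles
instance (all_news_articles : List (List (String × String))) (out : List (List (String × String))) : Decidable (Spec_combine_news_by_company all_news_articles out) := by unfold Spec_combine_news_by_company; infer_instance

-- ===== CLAIM (what is proved, stated in full; the proofs are below) =====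
def Claim_equal_combine_news_by_company : Prop := ∀ (all_news_articles : List (List (String × String))), Dom_combine_news_by_company all_news_articles → Spec_combine_news_by_company all_news_articles (combine_news_by_company all_news_articles)


-- ===== LEMMAS AND PROOFS =====

-- canonical grouping notions
def pvElig (xs : List (List (String × String))) : List (List (String × String)) :=
  xs.filter (fun it => decide (pvDesc it ≠ ""))

def pvKeys (xs : List (List (String × String))) : List String :=
  PySem.Set.ofList ((pvElig xs).map pvKey)

def pvGrp (t : String) (xs : List (List (String × String))) : List (List (String × String)) :=
  (pvElig xs).filter (fun it => decide (pvKey it = t))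

-- string lemmas
theorem str_append_assoc (a b c : String) : a ++ b ++ c = a ++ (b ++ c) := by
  rw [← String.toList_inj]; simp

theorem chars_join_nil : ∀ ls : List (List Char), PySem.Chars.join [] ls = ls.flatten
  | [] => rfl
  | [a] => by simp [PySem.Chars.join, List.intercalate]
  | a :: b :: t => by
      have ih := chars_join_nil (b :: t)
      simp only [PySem.Chars.join, List.intercalate] at ih ⊢
      simp [List.intersperse] at ih ⊢
      exact ih

theorem join_empty_cons (y : String) (ys : List String) :
    PySem.Str.join "" (y :: ys) = y ++ PySem.Str.join "" ys := by
  rw [← String.toList_inj]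
  simp [PySem.Str.toList_join, chars_join_nil]

theorem foldl_append_join {α : Type} (l : List α) (m : α → String) (acc : String) :
    l.foldl (fun s x => s ++ m x) acc = acc ++ PySem.Str.join "" (l.map m) := by
  induction l generalizing acc with
  | nil =>
      rw [← String.toList_inj]
      simp [PySem.Str.toList_join]
  | cons x t ih =>
      simp only [List.foldl_cons, List.map_cons, join_empty_cons, ih]
      rw [str_append_assoc]

-- canonical dict lemmas
theorem canContains {ν : Type} (ks : List String) (E : String → ν) (k : String) :
    (PySem.Dict.mk (ks.map fun t => (t, E t))).contains k = decide (k ∈ ks) := by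
  induction ks with
  | nil => rfl
  | cons a t ih =>
      simp only [PySem.Dict.contains, List.map_cons, List.any_cons] at ih ⊢
      by_cases h : a = k
      · simp [h, ih]
      · have h2 : ¬ k = a := fun e => h e.symm
        simp [h, h2, ih]

theorem canGetD {ν : Type} (ks : List String) (E : String → ν) (k : String)
    (hk : k ∈ ks) (dflt : ν) :
    (PySem.Dict.mk (ks.map fun t => (t, E t))).getD k dflt = E k := by
  induction ks with
  | nil => cases hk
  | cons a t ih =>
      by_cases h : a = k
      · subst h; simp [PySem.Dict.getD, PySem.Dict.get?]
      · rcases List.mem_cons.1 hk with h' | h'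
        · exact absurd h'.symm h
        · simpa [PySem.Dict.getD, PySem.Dict.get?, List.find?_cons, h] using ih h'

theorem canInsertPresent {ν : Type} (ks : List String) (E : String → ν) (k : String)
    (hk : k ∈ ks) (v : ν) :
    (PySem.Dict.mk (ks.map fun t => (t, E t))).insert k v
      = PySem.Dict.mk (ks.map fun t => (t, if t = k then v else E t)) := by
  simp only [PySem.Dict.insert, canContains, hk, decide_true, if_pos, List.map_map]
  congr 1
  apply List.map_congr_left
  intro t _
  by_cases h : t = k <;> simp [h]

theorem canInsertFresh {ν : Type} (ks : List String) (E : String → ν) (k : String)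
    (hk : k ∉ ks) (v : ν) :
    (PySem.Dict.mk (ks.map fun t => (t, E t))).insert k v
      = PySem.Dict.mk (ks.map (fun t => (t, E t)) ++ [(k, v)]) := by
  simp [PySem.Dict.insert, hk]

-- a loop of conditional modifies at one key of a canonical dict is one update of that key
theorem foldl_cond_modify {α ν : Type} (l : List α) (p : α → Prop) [DecidablePred p]
    (u : α → ν → ν) (ks : List String) (E : String → ν) (k : String) (hk : k ∈ ks) (dflt : ν) :
    l.foldl (fun dd x => if p x then dd.modify k dflt (u x) else dd)
        (PySem.Dict.mk (ks.map fun t => (t, E t)))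
      = PySem.Dict.mk (ks.map fun t =>
          (t, if t = k then (l.filter (fun x => decide (p x))).foldl (fun v x => u x v) (E k)
              else E t)) := by
  induction l generalizing E with
  | nil =>
      simp only [List.foldl_nil, List.filter_nil]
      congr 1
      apply List.map_congr_left
      intro t _
      by_cases h : t = k <;> simp [h]
  | cons x t ih =>
      by_cases hp : p x
      · have hstep : (PySem.Dict.mk (ks.map fun t => (t, E t))).modify k dflt (u x)
            = PySem.Dict.mk (ks.map fun t => (t, if t = k then u x (E k) else E t)) := by
          simp [PySem.Dict.modify, canGetD _ _ _ hk, canInsertPresent _ _ _ hk]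
        simp only [List.foldl_cons, if_pos hp]
        rw [hstep, ih (fun t' => if t' = k then u x (E k) else E t')]
        congr 1
        apply List.map_congr_left
        intro t' _
        by_cases h : t' = k <;> simp [h, hp]
      · simp only [List.foldl_cons, if_neg hp, ih]
        congr 1
        apply List.map_congr_left
        intro t' _
        by_cases h : t' = k <;> simp [h, hp]

theorem entry_modify (a b s : String) (f : String → String) :
    (PySem.Dict.mk [("ticker", a), ("title", b), ("description", s)]).modify "description" "" f
      = PySem.Dict.mk [("ticker", a), ("title", b), ("description", f s)] := by
  simp [PySem.Dict.modify, PySem.Dict.insert, PySem.Dict.contains, PySem.Dict.getD,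
    PySem.Dict.get?]

theorem entry_getD (a b s : String) :
    (PySem.Dict.mk [("ticker", a), ("title", b), ("description", s)]).getD "description" "" = s := by
  simp [PySem.Dict.getD, PySem.Dict.get?]

theorem foldl_entry_modify {α : Type} (l : List α) (g : α → String → String) (a b s : String) :
    l.foldl (fun e x => e.modify "description" "" (g x))
        (PySem.Dict.mk [("ticker", a), ("title", b), ("description", s)])
      = PySem.Dict.mk [("ticker", a), ("title", b),
          ("description", l.foldl (fun s' x => g x s') s)] := by
  induction l generalizing s with
  | nil => rfl
  | cons x t ih => simp only [List.foldl_cons, entry_modify, ih]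

-- grouping support
theorem elig_append (xs : List (List (String × String))) (x : List (String × String)) :
    pvElig (xs ++ [x]) = pvElig xs ++ if pvDesc x ≠ "" then [x] else [] := by
  by_cases h : pvDesc x = "" <;> simp [pvElig, List.filter_append, h]

theorem keys_append_elig (xs : List (List (String × String))) (x : List (String × String))
    (hd : pvDesc x ≠ "") :
    pvKeys (xs ++ [x]) = if pvKey x ∈ pvKeys xs then pvKeys xs else pvKeys xs ++ [pvKey x] := by
  simp only [pvKeys, elig_append, if_pos hd, List.map_append, List.map_cons, List.map_nil,
    PySem.Set.ofList_eq_foldl, List.foldl_append, List.foldl_cons, List.foldl_nil]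
  rw [← PySem.Set.ofList_eq_foldl]
  by_cases h : pvKey x ∈ PySem.Set.ofList ((pvElig xs).map pvKey) <;>
    simp [PySem.Set.add, PySem.Set.contains, h]

theorem keys_append_inelig (xs : List (List (String × String))) (x : List (String × String))
    (hd : ¬ pvDesc x ≠ "") : pvKeys (xs ++ [x]) = pvKeys xs := by
  simp [pvKeys, elig_append, hd]

theorem grp_append_hit (t : String) (xs : List (List (String × String)))
    (x : List (String × String)) (hd : pvDesc x ≠ "") (hk : pvKey x = t) :
    pvGrp t (xs ++ [x]) = pvGrp t xs ++ [x] := by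
  simp [pvGrp, elig_append, if_pos hd, List.filter_append, hk]

theorem grp_append_miss (t : String) (xs : List (List (String × String)))
    (x : List (String × String)) (h : ¬ pvDesc x ≠ "" ∨ pvKey x ≠ t) :
    pvGrp t (xs ++ [x]) = pvGrp t xs := by
  rcases h with h | h
  · simp [pvGrp, elig_append, h]
  · by_cases hd : pvDesc x ≠ ""
    · simp [pvGrp, elig_append, if_pos hd, List.filter_append, h]
    · simp [pvGrp, elig_append, hd]

theorem grp_nil_of_not_mem (t : String) (xs : List (List (String × String)))
    (h : t ∉ pvKeys xs) : pvGrp t xs = [] := by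
  unfold pvGrp
  rw [List.filter_eq_nil_iff]
  intro it hit
  simp only [decide_eq_true_eq]
  intro hkey
  exact h ((PySem.Set.mem_ofList _ _).2 (List.mem_map.2 ⟨it, hit, hkey⟩))

theorem grp_ne_nil_of_mem (t : String) (xs : List (List (String × String)))
    (h : t ∈ pvKeys xs) : pvGrp t xs ≠ [] := by
  obtain ⟨it, hit, hkey⟩ := List.mem_map.1 ((PySem.Set.mem_ofList _ _).1 h)
  intro hnil
  have : it ∈ pvGrp t xs := List.mem_filter.2 ⟨hit, by simp [hkey]⟩
  simp [hnil] at this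

-- the per-item description step used by B's renderer
def pvStepDesc (descAcc : String) (item : List (String × String)) : String :=
  let seen := PySem.Set.ofList (pvSplit descAcc "\n• ")
  let fresh := ((pvSplit (pvDesc item) ". ").map PySem.Str.strip).filter
      (fun line => line ≠ "" && !(PySem.Set.contains seen line))
  descAcc ++ PySem.Str.join "" (fresh.map (fun line => "\n• " ++ line))

theorem render_eq (t : String) (first : List (String × String))
    (rest : List (List (String × String))) :
    pvRenderGroup t (first :: rest)
      = [("ticker", t), ("title", pvTitle first),
         ("description", rest.foldl pvStepDesc ("• " ++ pvDesc first))] := rfl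

-- A's filtered line loop produces B's filter-and-join step
theorem filter_fold_desc (acc : String) (item : List (String × String)) :
    ((pvSplit (pvDesc item) ". ").filter (fun rawLine => decide
        (PySem.Str.strip rawLine ≠ "" ∧
          PySem.Set.contains (PySem.Set.ofList (pvSplit acc "\n• "))
            (PySem.Str.strip rawLine) = false))).foldl
        (fun s rawLine => s ++ "\n• " ++ PySem.Str.strip rawLine) acc
      = pvStepDesc acc item := by
  have hfn : (fun (s : String) rawLine => s ++ "\n• " ++ PySem.Str.strip rawLine)
      = fun (s : String) rawLine => s ++ ("\n• " ++ PySem.Str.strip rawLine) := by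
    funext s r; rw [str_append_assoc]
  rw [hfn, foldl_append_join]
  simp only [pvStepDesc]
  rw [List.filter_map, List.map_map]
  have hcomp : ((fun line => "\n• " ++ line) ∘ PySem.Str.strip)
      = (fun rawLine => "\n• " ++ PySem.Str.strip rawLine) := rfl
  rw [hcomp]
  have hpq : List.filter
      (fun rawLine => decide (PySem.Str.strip rawLine ≠ "" ∧
        (PySem.Set.ofList (pvSplit acc "\n• ")).contains (PySem.Str.strip rawLine) = false))
      (pvSplit (pvDesc item) ". ")
    = List.filter ((fun line => decide (line ≠ "") &&
        !(PySem.Set.ofList (pvSplit acc "\n• ")).contains line) ∘ PySem.Str.strip)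
      (pvSplit (pvDesc item) ". ") := by
    apply List.filter_congr
    intro r _
    cases hc : (PySem.Set.ofList (pvSplit acc "\n• ")).contains (PySem.Str.strip r)
    · rw [show ((PySem.Set.ofList (pvSplit acc "\n• ")).contains (PySem.Str.strip r) = false)
          ↔ PySem.Str.strip r ∉ pvSplit acc "\n• " from by
            simp [PySem.Set.contains, PySem.Set.mem_ofList]] at hc
      simp [Function.comp, hc]
    · rw [show ((PySem.Set.ofList (pvSplit acc "\n• ")).contains (PySem.Str.strip r) = true)
          ↔ PySem.Str.strip r ∈ pvSplit acc "\n• " from by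
            simp [PySem.Set.contains, PySem.Set.mem_ofList]] at hc
      simp [Function.comp, hc]
  rw [hpq]

-- the two fold invariants
theorem B_inv (xs : List (List (String × String))) :
    (xs.foldl (fun g item =>
        if pvDesc item ≠ "" then
          let key := pvKey item
          (g.setdefault key []).modify key [] (fun its => its ++ [item])
        else g)
      (PySem.Dict.empty : PySem.Dict String (List (List (String × String))))).items
      = (pvKeys xs).map (fun t => (t, pvGrp t xs)) := by
  induction xs using List.reverseRecOn with
  | nil => rfl
  | append_singleton xs x ih =>
    rw [List.foldl_append, List.foldl_cons, List.foldl_nil]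
    have hs : xs.foldl (fun g item =>
        if pvDesc item ≠ "" then
          let key := pvKey item
          (g.setdefault key []).modify key [] (fun its => its ++ [item])
        else g)
        (PySem.Dict.empty : PySem.Dict String (List (List (String × String))))
        = PySem.Dict.mk ((pvKeys xs).map fun t => (t, pvGrp t xs)) := PySem.Dict.ext ih
    rw [hs]
    by_cases hd : pvDesc x ≠ ""
    · simp only [if_pos hd]
      by_cases hk : pvKey x ∈ pvKeys xs
      · have h1 : (PySem.Dict.mk ((pvKeys xs).map fun t => (t, pvGrp t xs))).setdefault
            (pvKey x) [] = PySem.Dict.mk ((pvKeys xs).map fun t => (t, pvGrp t xs)) := by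
          simp [PySem.Dict.setdefault, hk]
        rw [h1]
        have h2 : (PySem.Dict.mk ((pvKeys xs).map fun t => (t, pvGrp t xs))).modify
            (pvKey x) [] (fun its => its ++ [x])
            = PySem.Dict.mk ((pvKeys xs).map fun t =>
                (t, if t = pvKey x then pvGrp (pvKey x) xs ++ [x] else pvGrp t xs)) := by
          simp [PySem.Dict.modify, canGetD _ _ _ hk, canInsertPresent _ _ _ hk]
        rw [h2, keys_append_elig xs x hd, if_pos hk]
        apply List.map_congr_left
        intro t ht
        by_cases h : t = pvKey x
        · rw [if_pos h, ← h, grp_append_hit t xs x hd h.symm]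
        · rw [if_neg h, grp_append_miss t xs x (Or.inr (fun e => h e.symm))]
      · have h1 : (PySem.Dict.mk ((pvKeys xs).map fun t => (t, pvGrp t xs))).setdefault
            (pvKey x) []
            = PySem.Dict.mk ((pvKeys xs ++ [pvKey x]).map fun t =>
                (t, if t = pvKey x then [] else pvGrp t xs)) := by
          have hc : (PySem.Dict.mk ((pvKeys xs).map fun t => (t, pvGrp t xs))).contains
              (pvKey x) = false := by
            rw [canContains]; simp [hk]
          simp only [PySem.Dict.setdefault, hc, Bool.false_eq_true, if_false]
          congr 1
          rw [List.map_append]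
          simp only [List.map_cons, List.map_nil]
          congr 1
          apply List.map_congr_left
          intro t ht
          rw [if_neg (fun e => hk (by rw [← e]; exact ht))]
        rw [h1]
        have hk' : pvKey x ∈ pvKeys xs ++ [pvKey x] := List.mem_append_right _ (by simp)
        have h2 : (PySem.Dict.mk ((pvKeys xs ++ [pvKey x]).map fun t =>
                (t, if t = pvKey x then [] else pvGrp t xs))).modify
            (pvKey x) [] (fun its => its ++ [x])
            = PySem.Dict.mk ((pvKeys xs ++ [pvKey x]).map fun t =>
                (t, if t = pvKey x then ([] : List (List (String × String))) ++ [x]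
                    else if t = pvKey x then [] else pvGrp t xs)) := by
          rw [show (PySem.Dict.mk ((pvKeys xs ++ [pvKey x]).map fun t =>
              (t, if t = pvKey x then [] else pvGrp t xs))).modify
              (pvKey x) [] (fun its => its ++ [x])
            = (PySem.Dict.mk ((pvKeys xs ++ [pvKey x]).map fun t =>
              (t, if t = pvKey x then [] else pvGrp t xs))).insert (pvKey x)
              (((PySem.Dict.mk ((pvKeys xs ++ [pvKey x]).map fun t =>
                (t, if t = pvKey x then [] else pvGrp t xs))).getD (pvKey x) []) ++ [x])
            from rfl]
          rw [canGetD _ _ _ hk', canInsertPresent _ _ _ hk']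
          simp
        rw [h2, keys_append_elig xs x hd, if_neg hk]
        apply List.map_congr_left
        intro t ht
        by_cases h : t = pvKey x
        · simp [h, grp_append_hit (pvKey x) xs x hd rfl, grp_nil_of_not_mem (pvKey x) xs hk]
        · rcases List.mem_append.1 ht with ht' | ht'
          · rw [if_neg h, if_neg h, grp_append_miss t xs x (Or.inr (fun e => h e.symm))]
          · exact absurd (by simpa using ht') h
    · simp only [if_neg hd]
      rw [keys_append_inelig xs x hd]
      show ((pvKeys xs).map fun t => (t, pvGrp t xs))
          = (pvKeys xs).map fun t => (t, pvGrp t (xs ++ [x]))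
      apply List.map_congr_left
      intro t _
      rw [grp_append_miss t xs x (Or.inl hd)]

theorem A_inv (xs : List (List (String × String))) :
    (xs.foldl pvStepA PySem.Dict.empty).items
      = (pvKeys xs).map (fun t => (t, PySem.Dict.mk (pvRenderGroup t (pvGrp t xs)))) := by
  induction xs using List.reverseRecOn with
  | nil => rfl
  | append_singleton xs x ih =>
    rw [List.foldl_append, List.foldl_cons, List.foldl_nil]
    have hs : xs.foldl pvStepA PySem.Dict.empty
        = PySem.Dict.mk ((pvKeys xs).map fun t =>
            (t, PySem.Dict.mk (pvRenderGroup t (pvGrp t xs)))) := PySem.Dict.ext ih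
    rw [hs]
    by_cases hd : pvDesc x = ""
    · rw [show pvStepA (PySem.Dict.mk ((pvKeys xs).map fun t =>
            (t, PySem.Dict.mk (pvRenderGroup t (pvGrp t xs))))) x
          = PySem.Dict.mk ((pvKeys xs).map fun t =>
            (t, PySem.Dict.mk (pvRenderGroup t (pvGrp t xs)))) from by
          simp only [pvStepA]; rw [if_pos hd]]
      rw [keys_append_inelig xs x (by simpa using hd)]
      apply List.map_congr_left
      intro t _
      rw [grp_append_miss t xs x (Or.inl (by simpa using hd))]
    · by_cases hk : pvKey x ∈ pvKeys xs
      · obtain ⟨f, r, hfr⟩ := List.exists_cons_of_ne_nil (grp_ne_nil_of_mem _ xs hk)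
        have hE : PySem.Dict.mk (pvRenderGroup (pvKey x) (pvGrp (pvKey x) xs))
            = PySem.Dict.mk [("ticker", pvKey x), ("title", pvTitle f),
                ("description", r.foldl pvStepDesc ("• " ++ pvDesc f))] := by
          rw [hfr, render_eq]
        have hstep : pvStepA (PySem.Dict.mk ((pvKeys xs).map fun t =>
              (t, PySem.Dict.mk (pvRenderGroup t (pvGrp t xs))))) x
            = PySem.Dict.mk ((pvKeys xs).map fun t =>
                (t, if t = pvKey x then
                      PySem.Dict.mk [("ticker", pvKey x), ("title", pvTitle f),
                        ("description", pvStepDesc (r.foldl pvStepDesc ("• " ++ pvDesc f)) x)]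
                    else PySem.Dict.mk (pvRenderGroup t (pvGrp t xs)))) := by
          simp only [pvStepA]
          rw [if_neg hd, if_pos (by rw [canContains]; simp [hk]),
            canGetD _ _ _ hk, hE, entry_getD,
            foldl_cond_modify _ _ _ _ _ _ hk, hE]
          simp only [foldl_entry_modify, filter_fold_desc]
        rw [hstep, keys_append_elig xs x (by simpa using hd), if_pos hk]
        apply List.map_congr_left
        intro t ht
        by_cases h : t = pvKey x
        · rw [if_pos h, h, grp_append_hit (pvKey x) xs x (by simpa using hd) rfl, hfr]
          rw [show (f :: r) ++ [x] = f :: (r ++ [x]) from rfl, render_eq, List.foldl_append,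
            List.foldl_cons, List.foldl_nil]
        · rw [if_neg h, grp_append_miss t xs x (Or.inr (fun e => h e.symm))]
      · have hstep : pvStepA (PySem.Dict.mk ((pvKeys xs).map fun t =>
              (t, PySem.Dict.mk (pvRenderGroup t (pvGrp t xs))))) x
            = PySem.Dict.mk (((pvKeys xs).map fun t =>
                (t, PySem.Dict.mk (pvRenderGroup t (pvGrp t xs))))
                ++ [(pvKey x, PySem.Dict.mk [("ticker", pvKey x), ("title", pvTitle x),
                      ("description", "• " ++ pvDesc x)])]) := by
          simp only [pvStepA]
          rw [if_neg hd, if_neg (by rw [canContains]; simp [hk]),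
            canInsertFresh _ _ _ hk]
        rw [hstep, keys_append_elig xs x (by simpa using hd), if_neg hk, List.map_append]
        have h1 : List.map (fun t => (t, PySem.Dict.mk (pvRenderGroup t (pvGrp t xs)))) (pvKeys xs)
            = List.map (fun t => (t, PySem.Dict.mk (pvRenderGroup t (pvGrp t (xs ++ [x])))))
                (pvKeys xs) := by
          apply List.map_congr_left
          intro t ht
          rw [grp_append_miss t xs x (Or.inr (fun e => hk (by rw [e]; exact ht)))]
        have h2 : pvGrp (pvKey x) (xs ++ [x]) = [x] := by
          rw [grp_append_hit (pvKey x) xs x (by simpa using hd) rfl,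
            grp_nil_of_not_mem (pvKey x) xs hk]
          rfl
        congr 1
        rw [← h1, List.map_cons, List.map_nil, h2]
        rfl

-- ===== VERDICT (by name: the statement is the Claim_ definition above) =====
theorem combine_news_by_company_spec : Claim_equal_combine_news_by_company := by
  intro xs _
  show combine_news_by_company xs = combine_news_by_company_alt xs
  simp only [combine_news_by_company, combine_news_by_company_alt]
  rw [B_inv]
  simp only [PySem.Dict.values]
  rw [A_inv]
  simp [List.map_map]
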